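-- pv_equiv track=rewrite | github.com/henrywalters/AdventOfCode2020 | solutions/day6_b.py | parse_groups
-- ===== SOURCE A (Python) =====
-- def parse_groups(lines):
--     groups = []
--     people = []
--
--     for line in lines:
--         if line == '':
--             groups.append(set.intersection(*[set(person) for person in people]))
--             people = []
--         else:
--             person = []
--             for c in line:
--                 person.append(c)
--             people.append(person)
--
--     groups.append(set.intersection(*[set(person) for person in people]))
--
--     return groups
-- ===== SOURCE B (Python) =====
-- def _group_common(group):
--     common = set(group[0])
--     for person in group[1:]:
--         common &= set(person)
--     return common
--
--
-- def parse_groups(lines):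
--     if '' in lines:
--         i = lines.index('')
--         return [_group_common(lines[:i])] + parse_groups(lines[i + 1:])
--     return [_group_common(lines)]
-- ===== Notes on version B (the rewrite author's own statement) =====
-- stated objective: alternative
-- what changed: B is recursive divide-and-conquer: it finds the first blank line with list.index, slices the group off, intersects it with a running '&=' accumulator seeded from the first person, and recurses on the rest, replacing A's single stateful loop over two accumulators and set.intersection(*...) splat.
import Mathlib
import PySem

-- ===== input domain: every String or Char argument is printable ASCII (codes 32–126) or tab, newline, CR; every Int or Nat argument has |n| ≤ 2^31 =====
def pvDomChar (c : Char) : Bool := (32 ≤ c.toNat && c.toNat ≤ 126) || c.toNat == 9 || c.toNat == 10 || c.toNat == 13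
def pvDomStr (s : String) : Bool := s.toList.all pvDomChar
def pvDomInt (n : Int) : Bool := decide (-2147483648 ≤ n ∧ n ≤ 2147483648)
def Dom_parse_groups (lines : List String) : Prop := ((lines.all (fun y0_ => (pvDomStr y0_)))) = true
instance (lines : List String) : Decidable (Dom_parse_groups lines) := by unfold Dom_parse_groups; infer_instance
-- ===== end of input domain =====

-- B is a recursive slice-at-first-blank decomposition with a running intersection; return values only, both raise on empty groups (excluded by Pre_).

-- ===== PORT A =====
-- set.intersection(s1, s2, …): elements of the first set also in all the others ([] never reached under Pre_)
def setIntersection (sets : List (List String)) : List String :=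
  match sets with
  | [] => []
  | s :: rest => rest.foldl (fun acc t => PySem.Set.inter acc t) s

-- A's inner loop: person = []; for c in line: person.append(c)
def personChars (line : String) : List String :=
  line.toList.foldl (fun acc c => acc ++ [String.ofList [c]]) []

def parse_groups (lines : List String) : List (List String) :=
  let st := lines.foldl (fun (st : List (List String) × List (List String)) line =>
    if line = "" then
      (st.1 ++ [setIntersection (st.2.map (fun p => PySem.Set.ofList p))], [])
    else
      (st.1, st.2 ++ [personChars line])) ([], [])
  st.1 ++ [setIntersection (st.2.map (fun p => PySem.Set.ofList p))]

-- ===== PORT B =====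
-- set(person) for a string person
def strSet (p : String) : List String :=
  PySem.Set.ofList (p.toList.map (fun c => String.ofList [c]))

-- _group_common: common = set(group[0]); for person in group[1:]: common &= set(person)
-- (group[0] on an empty group raises IndexError in Python; the [] branch is never reached under Pre_)
def groupCommon (group : List String) : List String :=
  match group with
  | [] => []
  | g :: rest => rest.foldl (fun acc p => PySem.Set.inter acc (strSet p)) (strSet g)

def parse_groups_alt (lines : List String) : List (List String) :=
  if h : "" ∈ lines then
    match hi : PySem.List.index? lines "" with
    | some i => groupCommon (lines.take i) :: parse_groups_alt (lines.drop (i + 1))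
    | none => []   -- unreachable: '' ∈ lines
  else [groupCommon lines]
termination_by lines.length
decreasing_by
  have hne : lines ≠ [] := by rintro rfl; simp at h
  have := List.length_pos_iff.mpr hne
  simp [List.length_drop]; omega

-- ===== PRECONDITION & SPEC =====
-- Pre_ excludes exactly the inputs with an empty group (empty input, leading/trailing '' or two
-- adjacent ''), where both Pythons raise (A a TypeError, B an IndexError).
def Pre_parse_groups (lines : List String) : Prop :=
  lines ≠ [] ∧ lines.head? ≠ some "" ∧ lines.getLast? ≠ some "" ∧
  ∀ p ∈ lines.zip lines.tail, p.1 ≠ "" ∨ p.2 ≠ ""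
instance (lines : List String) : Decidable (Pre_parse_groups lines) := by
  unfold Pre_parse_groups; infer_instance

def pvWitness_parse_groups : List String := ["ab", "b", "", "b"]

def Spec_parse_groups (lines : List String) (out : List (List String)) : Prop := out = parse_groups_alt lines
instance (lines : List String) (out : List (List String)) : Decidable (Spec_parse_groups lines out) := by unfold Spec_parse_groups; infer_instance

-- ===== CLAIM (what is proved, stated in full; the proofs are below) =====
def Claim_equal_parse_groups : Prop := ∀ (lines : List String), Dom_parse_groups lines → Pre_parse_groups lines → Spec_parse_groups lines (parse_groups lines)

-- ===== LEMMAS AND PROOFS =====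

theorem personChars_eq (line : String) :
    personChars line = line.toList.map (fun c => String.ofList [c]) := by
  unfold personChars
  induction line.toList using List.reverseRecOn with
  | nil => rfl
  | append_singleton xs x ih => simp [List.foldl_append, ih]

theorem strSet_eq (p : String) : PySem.Set.ofList (personChars p) = strSet p := by
  simp [strSet, personChars_eq]

-- A's group value on raw lines ps equals B's groupCommon ps
theorem setIntersection_eq (ps : List String) :
    setIntersection (ps.map (fun p => PySem.Set.ofList (personChars p))) = groupCommon ps := by
  cases ps with
  | nil => rfl
  | cons g rest =>
    simp [setIntersection, groupCommon, strSet_eq, List.foldl_map]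

theorem alt_no_blank (ps : List String) (hps : "" ∉ ps) :
    parse_groups_alt ps = [groupCommon ps] := by
  rw [parse_groups_alt]; simp [hps]

theorem alt_split (ps ls : List String) (hps : "" ∉ ps) :
    parse_groups_alt (ps ++ "" :: ls) = groupCommon ps :: parse_groups_alt ls := by
  rw [parse_groups_alt]
  have hmem : "" ∈ ps ++ "" :: ls := by simp
  have hidx : PySem.List.index? (ps ++ "" :: ls) "" = some ps.length := by
    have : ps ++ "" :: ls = (ps ++ [""]) ++ ls := by simp
    rw [this, PySem.List.index?_append_of_mem _ (by simp),
        PySem.List.index?_append_singleton_self _ _ hps]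
  rw [dif_pos hmem]
  split
  · rename_i i heq
    rw [hidx] at heq
    obtain rfl : i = ps.length := (Option.some_inj.mp heq).symm
    congr 1
    · congr 1
      exact List.take_left' rfl
    · congr 1
      have hsplit : ps ++ "" :: ls = (ps ++ [""]) ++ ls := by simp
      rw [hsplit]
      exact List.drop_left' (by simp)
  · rename_i heq
    rw [hidx] at heq
    cases heq

-- main invariant: A's fold from (gs, (ps mapped)) over lines equals gs ++ B on ps ++ lines
theorem key (lines : List String) : ∀ (gs : List (List String)) (ps : List String), "" ∉ ps →
    (let st := lines.foldl (fun (st : List (List String) × List (List String)) line =>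
        if line = "" then
          (st.1 ++ [setIntersection (st.2.map (fun p => PySem.Set.ofList p))], [])
        else
          (st.1, st.2 ++ [personChars line])) (gs, ps.map personChars)
     st.1 ++ [setIntersection (st.2.map (fun p => PySem.Set.ofList p))])
    = gs ++ parse_groups_alt (ps ++ lines) := by
  induction lines with
  | nil =>
    intro gs ps hps
    simp [alt_no_blank ps hps, Function.comp_def, setIntersection_eq]
  | cons l ls ih =>
    intro gs ps hps
    by_cases h : l = ""
    · subst h
      have := ih (gs ++ [groupCommon ps]) [] (by simp)
      simpa [alt_split ps ls hps, Function.comp_def, setIntersection_eq] using this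
    · have hps' : "" ∉ ps ++ [l] := by
        intro hm
        rcases List.mem_append.1 hm with h1 | h1
        · exact hps h1
        · simp at h1; exact h h1
      have := ih gs (ps ++ [l]) hps'
      simpa [h, List.map_append] using this

-- ===== VERDICT (by name: the statement is the Claim_ definition above) =====
theorem parse_groups_spec : Claim_equal_parse_groups := by
  intro lines _ _
  unfold Spec_parse_groups parse_groups
  simpa using key lines [] [] (by simp)
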